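-- pv_equiv track=rewrite | github.com/JakubBilski1/PAW | zadania-z-lekcji-03-04/zad2.2/index.py | binary_blocks
-- ===== SOURCE A (Python) =====
-- def binary_blocks(n):
--     blocks = 0
--     currentBlock = None
--     for digit in n:
--         digit = digit.replace('\n', '')
--         if digit == '1':
--             if currentBlock == '0' or currentBlock is None:
--                 blocks += 1
--                 currentBlock = '1'
--         else:
--             if currentBlock == '1' or currentBlock is None:
--                 blocks += 1
--                 currentBlock = '0'
--     return blocks
-- ===== SOURCE B (Python) =====
-- def binary_blocks(n):
--     ks = [c.replace('\n', '') == '1' for c in n]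
--     if not ks:
--         return 0
--     return 1 + sum(1 for a, b in zip(ks, ks[1:]) if a != b)
-- ===== Notes on version B (the rewrite author's own statement) =====
-- stated objective: simpler
-- what changed: Replaces the blocks/currentBlock state machine with a key pass (strip newlines, compare to '1') followed by counting adjacent key changes plus one for the first group.
import Mathlib
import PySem

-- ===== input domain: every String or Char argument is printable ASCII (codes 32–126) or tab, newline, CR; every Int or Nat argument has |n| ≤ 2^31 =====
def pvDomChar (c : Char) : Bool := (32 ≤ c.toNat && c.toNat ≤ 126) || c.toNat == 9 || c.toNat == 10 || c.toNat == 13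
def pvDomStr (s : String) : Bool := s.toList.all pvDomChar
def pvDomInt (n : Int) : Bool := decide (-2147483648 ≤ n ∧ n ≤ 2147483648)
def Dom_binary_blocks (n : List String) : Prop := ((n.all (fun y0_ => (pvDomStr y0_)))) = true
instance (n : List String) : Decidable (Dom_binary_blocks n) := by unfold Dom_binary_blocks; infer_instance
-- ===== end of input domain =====

-- B replaces A's blocks/currentBlock state machine by a key pass plus a count of adjacent key changes (objective: simpler).

-- ===== PORT A =====
-- one loop iteration of A: state = (blocks, currentBlock)
def pvAStep (st : Int × Option String) (digit : String) : Int × Option String :=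
  let d := PySem.Str.replace digit "\n" ""
  if d == "1" then
    if st.2 == some "0" || st.2 == none then (st.1 + 1, some "1") else st
  else
    if st.2 == some "1" || st.2 == none then (st.1 + 1, some "0") else st

def binary_blocks (n : List String) : Int :=
  (n.foldl pvAStep (0, none)).1

-- ===== PORT B =====
-- the key: c.replace('\n','') == '1'
def pvKey (c : String) : Bool := PySem.Str.replace c "\n" "" == "1"

def binary_blocks_alt (n : List String) : Int :=
  let ks := n.map pvKey
  match ks with
  | [] => 0
  | _ => 1 + ((ks.zip ks.tail).filter (fun p => p.1 != p.2)).length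

-- ===== PRECONDITION & SPEC =====
def Spec_binary_blocks (n : List String) (out : Int) : Prop := out = binary_blocks_alt n
instance (n : List String) (out : Int) : Decidable (Spec_binary_blocks n out) := by unfold Spec_binary_blocks; infer_instance

-- ===== CLAIM (what is proved, stated in full; the proofs are below) =====
def Claim_equal_binary_blocks : Prop := ∀ (n : List String), Dom_binary_blocks n → Spec_binary_blocks n (binary_blocks n)

-- ===== LEMMAS AND PROOFS =====

-- transitions of A's loop, keyed by the previous element's key
def pvChanges (k : Bool) : List String → Nat
  | [] => 0
  | c :: cs => (if pvKey c ≠ k then 1 else 0) + pvChanges (pvKey c) cs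

lemma pvAStep_state (st : Int × Option String) (c : String) (k : Bool)
    (h : st.2 = some (if k then "1" else "0")) :
    pvAStep st c = (st.1 + (if pvKey c ≠ k then 1 else 0),
                    some (if pvKey c then "1" else "0")) := by
  obtain ⟨b, cur⟩ := st
  simp only at h
  subst h
  by_cases hk : PySem.Str.replace c "\n" "" == "1" <;>
    cases k <;> simp [pvAStep, pvKey, hk]

lemma pvFoldA (l : List String) : ∀ (b : Int) (k : Bool),
    (l.foldl pvAStep (b, some (if k then "1" else "0"))).1 = b + pvChanges k l := by
  induction l with
  | nil => intro b k; simp [pvChanges]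
  | cons c cs ih =>
    intro b k
    rw [List.foldl_cons, pvAStep_state (b, some (if k then "1" else "0")) c k rfl]
    simp [pvChanges, ih]
    by_cases h : pvKey c = k <;> simp [h] <;> omega

lemma pvChanges_zip (cs : List String) : ∀ (c : String),
    (pvChanges (pvKey c) cs : Int) =
      ((((c :: cs).map pvKey).zip (cs.map pvKey)).filter (fun p => p.1 != p.2)).length := by
  induction cs with
  | nil => intro c; simp [pvChanges]
  | cons d ds ih =>
    intro c
    have hrest := ih d
    simp only [List.map_cons] at hrest
    by_cases h : pvKey d = pvKey c
    · rw [h] at hrest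
      simp [pvChanges, h]
      omega
    · simp [pvChanges, h, Ne.symm h]
      omega

-- ===== VERDICT (by name: the statement is the Claim_ definition above) =====
theorem binary_blocks_spec : Claim_equal_binary_blocks := by
  intro n _
  unfold Spec_binary_blocks binary_blocks binary_blocks_alt
  cases n with
  | nil => simp
  | cons c cs =>
    have h1 : pvAStep (0, none) c = (1, some (if pvKey c then "1" else "0")) := by
      by_cases hk : pvKey c <;> simp [pvAStep, pvKey] at hk ⊢ <;> simp [hk]

    simp only [List.foldl_cons, h1, pvFoldA cs 1 (pvKey c)]
    have := pvChanges_zip cs c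
    simp only [List.map_cons, List.tail_cons] at this ⊢
    omega
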